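-- pv_equiv track=rewrite | github.com/cutehammond772/problem-solving-archive | 백준/Gold/27742. 월드컵 조별리그/월드컵 조별리그.py | check
-- ===== SOURCE A (Python) =====
-- def check(matrix, T):
-- 	# [승점, 골득실, 다득점, 상대 전적]
-- 	P = [[0, 0, 0, 4 - i] for i in range(4)]
--
-- 	for a in range(4 - 1):
-- 		for b in range(a + 1, 4):
-- 			if matrix[a][b] == -1:
-- 				unknown = (a, b)
-- 				continue
--
-- 			if matrix[b][a] == -1:
-- 				unknown = (b, a)
-- 				continue
--
-- 			cmp = matrix[a][b] - matrix[b][a]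
--
-- 			if cmp > 0:
-- 				P[a][0] += 3
-- 				P[a][1] += cmp
-- 				P[a][2] += matrix[a][b]
--
-- 				P[b][1] += -cmp
-- 				P[b][2] += matrix[b][a]
-- 			elif cmp < 0:
-- 				P[b][0] += 3
-- 				P[b][1] += -cmp
-- 				P[b][2] += matrix[b][a]
--
-- 				P[a][1] += cmp
-- 				P[a][2] += matrix[a][b]
-- 			else:
-- 				P[a][0] += 1
-- 				P[a][2] += matrix[a][b]
--
-- 				P[b][0] += 1
-- 				P[b][2] += matrix[b][a]
--
-- 	P.sort()
--
-- 	for x in range(4):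
-- 		if 4 - P[x][3] == T:
-- 			return x > 1
-- ===== SOURCE B (Python) =====
-- def check(matrix, T):
--     # Per-team recomputation of (points, goal diff, goals for) over the 3 opponents,
--     # then count how many teams rank strictly above team T; qualify iff fewer than 2.
--     def key(t):
--         pts, gd, gf = 0, 0, 0
--         for o in range(4):
--             if o == t:
--                 continue
--             x, y = matrix[t][o], matrix[o][t]
--             if x == -1 or y == -1:
--                 continue
--             d = x - y
--             pts += 3 if d > 0 else (1 if d == 0 else 0)
--             gd += d
--             gf += x
--         return [pts, gd, gf, 4 - t]
--
--     kT = key(T)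
--     better = sum(1 for t in range(4) if key(t) > kT)
--     return better < 2
-- ===== Notes on version B (the rewrite author's own statement) =====
-- stated objective: simpler
-- what changed: A builds a mutable standings table via a pairwise match loop, sorts it and scans the sorted order for team T's position; B recomputes each team's key functionally per team and decides qualification by counting how many teams compare strictly above T, with no table mutation and no sort.
-- outside the precondition, e.g. on check([[0, 0, 0, -1], [0, 0, 0, -1], [0, 0, 0, -1], []], 0): A returns True, B raises IndexError
import Mathlib
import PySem

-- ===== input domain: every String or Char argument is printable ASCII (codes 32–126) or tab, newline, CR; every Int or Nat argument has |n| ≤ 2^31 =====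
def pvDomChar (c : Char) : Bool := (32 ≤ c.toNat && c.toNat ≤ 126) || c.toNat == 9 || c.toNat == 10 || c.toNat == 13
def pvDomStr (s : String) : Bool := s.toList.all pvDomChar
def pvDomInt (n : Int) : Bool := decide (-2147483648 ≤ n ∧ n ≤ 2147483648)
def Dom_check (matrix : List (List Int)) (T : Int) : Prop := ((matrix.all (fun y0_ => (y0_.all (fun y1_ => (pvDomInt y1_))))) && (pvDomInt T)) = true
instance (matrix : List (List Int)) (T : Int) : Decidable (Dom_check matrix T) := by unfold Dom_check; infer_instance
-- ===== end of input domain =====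

-- B replaces A's sort-then-scan ranking by a per-team recomputation plus a count of
-- strictly better teams (objective: simpler); return value only, A mutates nothing shared.


-- ===== PORT A =====
-- matrix[i][j]; under Pre_check every index used is in range, so the defaults are never read
def mget (matrix : List (List Int)) (i j : Int) : Int :=
  PySem.List.pyGetD (PySem.List.pyGetD matrix i []) j 0

-- P[i][c] += d (every i used is a nonnegative in-range index, so .toNat is exact here)
def updA (P : List (List Int)) (i : Int) (c : Nat) (d : Int) : List (List Int) :=
  P.modify i.toNat (fun row => row.modify c (· + d))

-- body of the pair loop; the dead 'unknown = (a, b)' assignments are dropped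
def stepA (matrix : List (List Int)) (P : List (List Int)) (a b : Int) : List (List Int) :=
  let mab := mget matrix a b
  if mab = -1 then P
  else
    let mba := mget matrix b a
    if mba = -1 then P
    else
      let cmp := mab - mba
      if cmp > 0 then
        updA (updA (updA (updA (updA P a 0 3) a 1 cmp) a 2 mab) b 1 (-cmp)) b 2 mba
      else if cmp < 0 then
        updA (updA (updA (updA (updA P b 0 3) b 1 (-cmp)) b 2 mba) a 1 cmp) a 2 mab
      else
        updA (updA (updA (updA P a 0 1) a 2 mab) b 0 1) b 2 mba

def buildP (matrix : List (List Int)) : List (List Int) :=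
  (PySem.List.pyRange 0 (4 - 1) 1).foldl (fun P a =>
      (PySem.List.pyRange (a + 1) 4 1).foldl (fun P b => stepA matrix P a b) P)
    ((PySem.List.pyRange 0 4 1).map (fun i => [0, 0, 0, 4 - i]))

-- the trailing 'for x in range(4): if 4 - P[x][3] == T: return x > 1'
def scanA (P : List (List Int)) (T : Int) : List Int → Option Bool
  | [] => none
  | x :: rest => if 4 - mget P x 3 = T then some (decide (x > 1)) else scanA P T rest

-- falling through the final loop is Python's implicit None: excluded by Pre_check (0 ≤ T < 4)
def check (matrix : List (List Int)) (T : Int) : Bool :=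
  (scanA (PySem.List.sorted (buildP matrix) (fun p => p) false) T (PySem.List.pyRange 0 4 1)).getD false

-- ===== PORT B =====
def keyB (matrix : List (List Int)) (t : Int) : List Int :=
  let s := (PySem.List.pyRange 0 4 1).foldl (fun (s : Int × Int × Int) o =>
      if o = t then s
      else
        let x := mget matrix t o
        let y := mget matrix o t
        if x = -1 ∨ y = -1 then s
        else
          let d := x - y
          (s.1 + (if d > 0 then 3 else if d = 0 then 1 else 0), s.2.1 + d, s.2.2 + x))
    (0, 0, 0)
  [s.1, s.2.1, s.2.2, 4 - t]

def check_alt (matrix : List (List Int)) (T : Int) : Bool :=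
  let kT := keyB matrix T
  let better := (PySem.List.pyRange 0 4 1).countP (fun t => decide (kT < keyB matrix t))
  decide (better < 2)

-- ===== PRECONDITION & SPEC =====
-- Pre_check requires a full 4×4 block (A can also return on smaller shapes when a -1 entry
-- makes it skip the symmetric read, and B raises there) and 0 ≤ T < 4 (for T outside that
-- range A falls off its final loop and returns None, which is not a bool).
def Pre_check (matrix : List (List Int)) (T : Int) : Prop :=
  4 ≤ matrix.length ∧ (∀ row ∈ matrix.take 4, 4 ≤ row.length) ∧ 0 ≤ T ∧ T < 4
instance (matrix : List (List Int)) (T : Int) : Decidable (Pre_check matrix T) := by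
  unfold Pre_check; infer_instance

def pvWitness_check : List (List Int) × Int :=
  ([[0, 1, 2, 3], [0, 0, 1, 1], [2, 2, 0, 5], [1, 1, 1, 0]], 2)

def Spec_check (matrix : List (List Int)) (T : Int) (out : Bool) : Prop := out = check_alt matrix T
instance (matrix : List (List Int)) (T : Int) (out : Bool) : Decidable (Spec_check matrix T out) := by unfold Spec_check; infer_instance

-- ===== CLAIM (what is proved, stated in full; the proofs are below) =====
def Claim_equal_check : Prop := ∀ (matrix : List (List Int)) (T : Int), Dom_check matrix T → Pre_check matrix T → Spec_check matrix T (check matrix T)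

-- ===== LEMMAS AND PROOFS =====

-- the additive contribution of the match t-vs-o to team t's [points, goal diff, goals for]
def contrib (x y : Int) : Int × Int × Int :=
  (if x = -1 ∨ y = -1 then 0 else if x - y > 0 then 3 else if x - y = 0 then 1 else 0,
   if x = -1 ∨ y = -1 then 0 else x - y,
   if x = -1 ∨ y = -1 then 0 else x)

def addRow (c : Int × Int × Int) (row : List Int) : List Int :=
  ((row.modify 0 (· + c.1)).modify 1 (· + c.2.1)).modify 2 (· + c.2.2)

-- A's pair-loop body is the pair of additive per-team updates
lemma modify_fun_id {α : Type} (l : List α) (i : Nat) : l.modify i (fun v => v) = l :=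
  List.modify_id i l

lemma modify2_congr (P : List (List Int)) (i j : Nat) (f f' g g' : List Int → List Int)
    (hf : ∀ r, f r = f' r) (hg : ∀ r, g r = g' r) :
    (P.modify i f).modify j g = (P.modify i f').modify j g' := by
  rw [funext hf, funext hg]

lemma stepA_eq (matrix P : List (List Int)) (a b : Int) (hab : a.toNat ≠ b.toNat) :
    stepA matrix P a b =
      (P.modify a.toNat (addRow (contrib (mget matrix a b) (mget matrix b a)))).modify b.toNat
        (addRow (contrib (mget matrix b a) (mget matrix a b))) := by
  unfold stepA updA addRow contrib
  set x := mget matrix a b with hxdef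
  set y := mget matrix b a with hydef
  by_cases hx : x = -1
  · simp [hx, modify_fun_id]
  by_cases hy : y = -1
  · simp [hx, hy, modify_fun_id]
  have hne1 : ¬ (x = -1 ∨ y = -1) := by simp [hx, hy]
  have hne2 : ¬ (y = -1 ∨ x = -1) := by simp [hx, hy]
  rcases lt_trichotomy (x - y) 0 with h | h | h
  · -- team b wins
    rw [if_neg hx, if_neg hy, if_neg (show ¬ (x - y > 0) by omega), if_pos h]
    simp only [if_neg hne1, if_neg hne2, if_neg (show ¬ (x - y > 0) by omega),
      if_neg (show ¬ (x - y = 0) by omega), if_pos (show y - x > 0 by omega)]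
    simp only [List.modify_modify_eq]
    rw [List.modify_modify_ne _ _ _ (Ne.symm hab)]
    apply modify2_congr <;> intro row <;>
      simp [Function.comp, neg_sub, modify_fun_id]
  · -- draw
    rw [if_neg hx, if_neg hy, if_neg (show ¬ (x - y > 0) by omega),
      if_neg (show ¬ (x - y < 0) by omega)]
    simp only [if_neg hne1, if_neg hne2, if_neg (show ¬ (x - y > 0) by omega),
      if_neg (show ¬ (y - x > 0) by omega), if_pos h, if_pos (show y - x = 0 by omega)]
    simp only [List.modify_modify_eq]
    apply modify2_congr <;> intro row <;>
      simp [Function.comp, h, show y - x = 0 by omega, modify_fun_id]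
  · -- team a wins
    rw [if_neg hx, if_neg hy, if_pos (show x - y > 0 by omega)]
    simp only [if_neg hne1, if_neg hne2, if_pos (show x - y > 0 by omega),
      if_neg (show ¬ (y - x > 0) by omega), if_neg (show ¬ (y - x = 0) by omega)]
    simp only [List.modify_modify_eq]
    apply modify2_congr <;> intro row <;>
      simp [Function.comp, neg_sub, modify_fun_id]

-- hoisting B's skip guard into each component of the accumulator
lemma hoist (c : Prop) [Decidable c] (s : Int × Int × Int) (p g f : Int) :
    (if c then s else (s.1 + p, s.2.1 + g, s.2.2 + f))
      = (s.1 + (if c then 0 else p), s.2.1 + (if c then 0 else g), s.2.2 + (if c then 0 else f)) := by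
  split <;> simp

-- the built standings table is exactly B's four keys
lemma buildP_eq (matrix : List (List Int)) :
    buildP matrix = [keyB matrix 0, keyB matrix 1, keyB matrix 2, keyB matrix 3] := by
  have r0 : PySem.List.pyRange 0 (4-1) 1 = [0,1,2] := by decide
  have r1 : PySem.List.pyRange (0+1) 4 1 = [1,2,3] := by decide
  have r2 : PySem.List.pyRange (1+1) 4 1 = [2,3] := by decide
  have r3 : PySem.List.pyRange (2+1) 4 1 = [3] := by decide
  have r4 : PySem.List.pyRange 0 4 1 = [0,1,2,3] := by decide
  rw [buildP, r0]
  simp only [List.foldl_cons, List.foldl_nil]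
  rw [r1, r2, r3, r4]
  simp only [List.foldl_cons, List.foldl_nil, List.map_cons, List.map_nil]
  rw [stepA_eq matrix _ 0 1 (by decide), stepA_eq matrix _ 0 2 (by decide),
    stepA_eq matrix _ 0 3 (by decide), stepA_eq matrix _ 1 2 (by decide),
    stepA_eq matrix _ 1 3 (by decide), stepA_eq matrix _ 2 3 (by decide)]
  simp only [keyB, r4, List.foldl_cons, List.foldl_nil, hoist]
  simp [addRow, contrib, List.modify_zero_cons, List.modify_succ_cons]
lemma label_keyB (matrix : List (List Int)) (t : Int) :
    PySem.List.pyGetD (keyB matrix t) 3 0 = 4 - t := by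
  simp [keyB, PySem.List.pyGetD]

-- labels identify the team: component 3 of keyB matrix t is 4 - t
lemma keyB_inj (matrix : List (List Int)) (i j : Int) (h : keyB matrix i = keyB matrix j) :
    i = j := by
  have h3 := congrArg (fun q => PySem.List.pyGetD q 3 0) h
  simp only [label_keyB] at h3
  omega

-- sorted-position scan versus strictly-better count, on any 4 distinct keys
lemma scan_vs_count (l : List (List Int)) (e : List Int) (T : Int)
    (hlen : l.length = 4) (hnd : l.Nodup) (he : e ∈ l)
    (hu : ∀ q ∈ l, (4 - PySem.List.pyGetD q 3 0 = T ↔ q = e)) :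
    ((scanA (PySem.List.sorted l (fun p => p) false) T (PySem.List.pyRange 0 4 1)).getD false)
      = decide (l.countP (fun q => decide (e < q)) < 2) := by
  have r4 : PySem.List.pyRange 0 4 1 = [0, 1, 2, 3] := by decide
  rw [r4]
  have hperm : (PySem.List.sorted l (fun p => p) false).Perm l := PySem.List.sorted_perm l _ false
  have hpw : (PySem.List.sorted l (fun p => p) false).Pairwise (fun a b => a ≤ b) := by
    convert PySem.List.sorted_pairwise (κ := List Int) l (fun p => p) using 2
  have hsn : (PySem.List.sorted l (fun p => p) false).Nodup := hperm.nodup_iff.mpr hnd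
  have hl4 : (PySem.List.sorted l (fun p => p) false).length = 4 := by
    rw [hperm.length_eq, hlen]
  obtain ⟨q0, q1, q2, q3, hs⟩ :
      ∃ a b c d, PySem.List.sorted l (fun p => p) false = [a, b, c, d] := by
    rcases hsx : PySem.List.sorted l (fun p => p) false with
      _ | ⟨a, _ | ⟨b, _ | ⟨c, _ | ⟨d, _ | ⟨x, rest⟩⟩⟩⟩⟩ <;>
      rw [hsx] at hl4 <;> simp at hl4
    exact ⟨a, b, c, d, rfl⟩
  rw [hs] at hperm hpw hsn
  simp only [List.pairwise_cons, List.mem_cons, List.not_mem_nil, or_false,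
    forall_eq_or_imp, forall_eq, List.nodup_cons, List.nodup_nil, and_true, List.Pairwise.nil,
    not_or] at hpw hsn
  have l01 : q0 < q1 := lt_of_le_of_ne hpw.1.1 hsn.1.1
  have l02 : q0 < q2 := lt_of_le_of_ne hpw.1.2.1 hsn.1.2.1
  have l03 : q0 < q3 := lt_of_le_of_ne hpw.1.2.2 hsn.1.2.2
  have l12 : q1 < q2 := lt_of_le_of_ne hpw.2.1.1 hsn.2.1.1
  have l13 : q1 < q3 := lt_of_le_of_ne hpw.2.1.2 hsn.2.1.2
  have l23 : q2 < q3 := lt_of_le_of_ne hpw.2.2.1 hsn.2.2.1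
  have hin : ∀ q ∈ ([q0, q1, q2, q3] : List (List Int)), q ∈ l := fun q hq => hperm.subset hq
  have c0 := hu q0 (hin q0 (by simp))
  have c1 := hu q1 (hin q1 (by simp))
  have c2 := hu q2 (hin q2 (by simp))
  have c3 := hu q3 (hin q3 (by simp))
  have m0 : mget [q0, q1, q2, q3] 0 3 = PySem.List.pyGetD q0 3 0 := by
    simp [mget, PySem.List.pyGetD]
  have m1 : mget [q0, q1, q2, q3] 1 3 = PySem.List.pyGetD q1 3 0 := by
    simp [mget, PySem.List.pyGetD]
  have m2 : mget [q0, q1, q2, q3] 2 3 = PySem.List.pyGetD q2 3 0 := by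
    simp [mget, PySem.List.pyGetD]
  have m3 : mget [q0, q1, q2, q3] 3 3 = PySem.List.pyGetD q3 3 0 := by
    simp [mget, PySem.List.pyGetD]
  rw [← hperm.countP_eq]
  have he' : e ∈ ([q0, q1, q2, q3] : List (List Int)) := hperm.mem_iff.mpr he
  rcases (by simpa using he' : e = q0 ∨ e = q1 ∨ e = q2 ∨ e = q3) with rfl | rfl | rfl | rfl
  · simp only [hs, scanA, m0]
    rw [if_pos (c0.mpr rfl)]
    simp [l01, l02, l03]
  · simp only [hs, scanA, m0, m1]
    rw [if_neg (fun h => absurd (c0.mp h) (ne_of_lt l01)), if_pos (c1.mpr rfl)]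
    have a0 : ¬ e < q0 := lt_asymm l01
    simp [l12, l13, a0]
  · simp only [hs, scanA, m0, m1, m2]
    rw [if_neg (fun h => absurd (c0.mp h) (ne_of_lt l02)),
      if_neg (fun h => absurd (c1.mp h) (ne_of_lt l12)), if_pos (c2.mpr rfl)]
    have a0 : ¬ e < q0 := lt_asymm l02
    have a1 : ¬ e < q1 := lt_asymm l12
    simp [l23, a0, a1]
  · simp only [hs, scanA, m0, m1, m2, m3]
    rw [if_neg (fun h => absurd (c0.mp h) (ne_of_lt l03)),
      if_neg (fun h => absurd (c1.mp h) (ne_of_lt l13)),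
      if_neg (fun h => absurd (c2.mp h) (ne_of_lt l23)), if_pos (c3.mpr rfl)]
    have a0 : ¬ e < q0 := lt_asymm l03
    have a1 : ¬ e < q1 := lt_asymm l13
    have a2 : ¬ e < q2 := lt_asymm l23
    simp [a0, a1, a2]

-- ===== VERDICT (by name: the statement is the Claim_ definition above) =====
theorem check_spec : Claim_equal_check := by
  unfold Claim_equal_check
  intro matrix T hdom hpre
  obtain ⟨hlen, hrows, hT0, hT4⟩ := hpre
  unfold Spec_check check check_alt
  rw [buildP_eq]
  have hnd : [keyB matrix 0, keyB matrix 1, keyB matrix 2, keyB matrix 3].Nodup := by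
    apply List.Nodup.of_map (f := fun q => PySem.List.pyGetD q 3 0)
    simp [label_keyB]
  have hT : T = 0 ∨ T = 1 ∨ T = 2 ∨ T = 3 := by omega
  have he : keyB matrix T ∈ [keyB matrix 0, keyB matrix 1, keyB matrix 2, keyB matrix 3] := by
    rcases hT with rfl | rfl | rfl | rfl <;> simp
  have hu : ∀ q ∈ [keyB matrix 0, keyB matrix 1, keyB matrix 2, keyB matrix 3],
      (4 - PySem.List.pyGetD q 3 0 = T ↔ q = keyB matrix T) := by
    intro q hq
    rcases (by simpa using hq : q = keyB matrix 0 ∨ q = keyB matrix 1 ∨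
        q = keyB matrix 2 ∨ q = keyB matrix 3) with rfl | rfl | rfl | rfl <;>
      rw [label_keyB] <;>
      constructor <;> intro h
    · rw [show T = 0 by omega]
    · have := keyB_inj matrix _ _ h; omega
    · rw [show T = 1 by omega]
    · have := keyB_inj matrix _ _ h; omega
    · rw [show T = 2 by omega]
    · have := keyB_inj matrix _ _ h; omega
    · rw [show T = 3 by omega]
    · have := keyB_inj matrix _ _ h; omega
  rw [scan_vs_count _ (keyB matrix T) T (by simp) hnd he hu]
  have r4 : PySem.List.pyRange 0 4 1 = [0, 1, 2, 3] := by decide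
  rw [r4]
  simp [List.countP_cons]
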